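-- pv_equiv track=rewrite | github.com/hghwng/mooc-algs2 | quiz/5-regex.py | make_epsilon_transition
-- ===== SOURCE A (Python) =====
-- def make_epsilon_transition(regex):
--     trans = list(map(lambda x: set(), range(len(regex))))
--     stack = []
--
--     for i in range(len(regex)):
--         c = regex[i]
--         group_begin = i
--
--         if c == '(':
--             trans[i].add(i + 1)
--             stack.append(i)
--         elif c == '|':
--             stack.append(i)
--         elif c == ')':
--             trans[i].add(i + 1)
--             top = stack.pop()
--             if regex[top] == '(':
--                 group_begin = top
--             elif regex[top] == '|':
--                 group_begin = stack.pop()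
--                 trans[group_begin].add(top + 1)
--                 trans[top].add(i)
--         elif c == '*':
--             trans[i].add(i + 1)
--
--         if i + 1 < len(regex) and regex[i + 1] == '*':
--             trans[group_begin].add(i + 1)
--             trans[i + 1].add(group_begin)
--
--     return trans
-- ===== SOURCE B (Python) =====
-- def make_epsilon_transition(regex):
--     n = len(regex)
--     # pass 1: match table: for each ')' position i, (group_begin, pipe position or None)
--     match = {}
--     stack = []
--     for i in range(n):
--         c = regex[i]
--         if c == '(' or c == '|':
--             stack.append(i)
--         elif c == ')':
--             top = stack.pop()
--             if regex[top] == '(':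
--                 match[i] = (top, None)
--             elif regex[top] == '|':
--                 match[i] = (stack.pop(), top)
--             else:
--                 match[i] = (i, None)
--     # pass 2: emit transitions from the table, no live stack
--     trans = [set() for _ in range(n)]
--     for i in range(n):
--         c = regex[i]
--         group_begin = i
--         if c == '(' or c == '*':
--             trans[i].add(i + 1)
--         elif c == ')':
--             trans[i].add(i + 1)
--             group_begin, pipe = match[i]
--             if pipe is not None:
--                 trans[group_begin].add(pipe + 1)
--                 trans[pipe].add(i)
--         if i + 1 < n and regex[i + 1] == '*':
--             trans[group_begin].add(i + 1)
--             trans[i + 1].add(group_begin)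
--     return trans
-- ===== Notes on version B (the rewrite author's own statement) =====
-- stated objective: alternative
-- what changed: A builds the transition sets in a single pass driven by a live index stack; B first runs a stack pass that only records a match table (for each close-paren its group begin and the single popped pipe), then a second stackless pass that emits all transitions from that precomputed table.
import Mathlib
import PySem

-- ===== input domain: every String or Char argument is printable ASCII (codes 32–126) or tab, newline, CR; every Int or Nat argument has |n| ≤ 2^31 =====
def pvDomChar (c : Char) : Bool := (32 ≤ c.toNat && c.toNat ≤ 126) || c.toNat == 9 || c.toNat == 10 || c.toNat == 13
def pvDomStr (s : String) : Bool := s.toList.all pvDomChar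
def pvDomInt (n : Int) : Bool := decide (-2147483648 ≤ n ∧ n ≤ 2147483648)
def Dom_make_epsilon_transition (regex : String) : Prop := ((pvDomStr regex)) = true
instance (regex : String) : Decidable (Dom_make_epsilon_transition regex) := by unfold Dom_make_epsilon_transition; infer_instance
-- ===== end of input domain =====

-- B replaces A's single stack-driven pass by a table-first decomposition: pass 1 builds a
-- match table (for each ')' its group begin and the single popped '|', mirroring A's one-pop
-- rule), pass 2 emits all transitions from that table with no live stack. Objective: alternative.

-- ===== PORT A =====
-- trans[j].add(v) on the list of sets
def pvAddT (t : List (PySem.Set Int)) (j : Nat) (v : Int) : List (PySem.Set Int) :=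
  t.modify j (fun s => PySem.Set.add s v)

-- the shared tail of A's loop body: the '*' lookahead (state = (trans, stack, group_begin))
def pvLookA (r : List Char) (i : Nat) (p : List (PySem.Set Int) × List Nat × Nat) :
    List (PySem.Set Int) × List Nat :=
  if i + 1 < r.length ∧ r.getD (i + 1) ' ' = '*' then
    (pvAddT (pvAddT p.1 p.2.2 ((i : Int) + 1)) (i + 1) (p.2.2 : Int), p.2.1)
  else (p.1, p.2.1)

-- one iteration of A's loop; state = (trans, stack).  In the two spots where Python's
-- stack.pop() raises IndexError (excluded by Pre_) the port leaves the branch body undone.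
def pvStepA (r : List Char) (st : List (PySem.Set Int) × List Nat) (i : Nat) :
    List (PySem.Set Int) × List Nat :=
  let c := r.getD i ' '
  pvLookA r i (
    if c = '(' then (pvAddT st.1 i ((i : Int) + 1), i :: st.2, i)
    else if c = '|' then (st.1, i :: st.2, i)
    else if c = ')' then
      let t1 := pvAddT st.1 i ((i : Int) + 1)
      match st.2 with
      | [] => (t1, ([] : List Nat), i)
      | top :: rest =>
        if r.getD top ' ' = '(' then (t1, rest, top)
        else if r.getD top ' ' = '|' then
          match rest with
          | [] => (t1, ([] : List Nat), i)
          | gb :: rest2 => (pvAddT (pvAddT t1 gb ((top : Int) + 1)) top (i : Int), rest2, gb)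
        else (t1, rest, i)
    else if c = '*' then (pvAddT st.1 i ((i : Int) + 1), st.2, i)
    else (st.1, st.2, i))

def make_epsilon_transition (regex : String) : List (List Int) :=
  let r := regex.toList
  ((List.range r.length).foldl (pvStepA r)
    (List.replicate r.length (PySem.Set.empty : PySem.Set Int), [])).1

-- ===== PORT B =====
-- pass 1: one iteration building the match table; state = (stack, table).
-- table entry for a ')' at i: (group_begin, popped '|' position or none).
-- Where Python's stack.pop() raises (excluded by Pre_) the port records (i, none).
def pvStep1 (r : List Char) (st : List Nat × PySem.Dict Nat (Nat × Option Nat)) (i : Nat) :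
    List Nat × PySem.Dict Nat (Nat × Option Nat) :=
  let c := r.getD i ' '
  if c = '(' ∨ c = '|' then (i :: st.1, st.2)
  else if c = ')' then
    match st.1 with
    | [] => ([], st.2.insert i (i, none))
    | top :: rest =>
      if r.getD top ' ' = '(' then (rest, st.2.insert i (top, none))
      else if r.getD top ' ' = '|' then
        match rest with
        | [] => ([], st.2.insert i (i, none))
        | gb :: rest2 => (rest2, st.2.insert i (gb, some top))
      else (rest, st.2.insert i (i, none))
  else st

-- pass 2 tail: the '*' lookahead (state = (trans, group_begin))
def pvLookB (r : List Char) (i : Nat) (q : List (PySem.Set Int) × Nat) : List (PySem.Set Int) :=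
  if i + 1 < r.length ∧ r.getD (i + 1) ' ' = '*' then
    pvAddT (pvAddT q.1 q.2 ((i : Int) + 1)) (i + 1) (q.2 : Int)
  else q.1

-- pass 2: one transition-emitting iteration, driven by the precomputed table, no stack
def pvStep2 (r : List Char) (d : PySem.Dict Nat (Nat × Option Nat))
    (trans : List (PySem.Set Int)) (i : Nat) : List (PySem.Set Int) :=
  let c := r.getD i ' '
  pvLookB r i (
    if c = '(' ∨ c = '*' then (pvAddT trans i ((i : Int) + 1), i)
    else if c = ')' then
      let t1 := pvAddT trans i ((i : Int) + 1)
      let e := d.getD i (i, none)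
      match e.2 with
      | some top => (pvAddT (pvAddT t1 e.1 ((top : Int) + 1)) top (i : Int), e.1)
      | none => (t1, e.1)
    else (trans, i))

def make_epsilon_transition_alt (regex : String) : List (List Int) :=
  let r := regex.toList
  let d := ((List.range r.length).foldl (pvStep1 r) ([], PySem.Dict.empty)).2
  (List.range r.length).foldl (pvStep2 r d)
    (List.replicate r.length (PySem.Set.empty : PySem.Set Int))

-- ===== PRECONDITION & SPEC =====
-- shape predicate: processing never pops an empty stack, i.e. every ')' finds an opener
-- ('(' or a pending '|', which consumes a second opener).  Exactly where Python A's
-- stack.pop() would raise IndexError this is false.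
def pvOk : List Char → List Char → Bool
  | [], _ => true
  | c :: cs, st =>
    if c = '(' ∨ c = '|' then pvOk cs (c :: st)
    else if c = ')' then
      match st with
      | [] => false
      | t :: rest =>
        if t = '|' then
          match rest with
          | [] => false
          | _ :: rest2 => pvOk cs rest2
        else pvOk cs rest
    else pvOk cs st

def Pre_make_epsilon_transition (regex : String) : Prop := pvOk regex.toList [] = true
instance (regex : String) : Decidable (Pre_make_epsilon_transition regex) := by
  unfold Pre_make_epsilon_transition; infer_instance

def pvWitness_make_epsilon_transition : String := "(a|b)*"

def Spec_make_epsilon_transition (regex : String) (out : List (List Int)) : Prop := out = make_epsilon_transition_alt regex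
instance (regex : String) (out : List (List Int)) : Decidable (Spec_make_epsilon_transition regex out) := by unfold Spec_make_epsilon_transition; infer_instance

-- ===== CLAIM (what is proved, stated in full; the proofs are below) =====
def Claim_equal_make_epsilon_transition : Prop := ∀ (regex : String), Dom_make_epsilon_transition regex → Pre_make_epsilon_transition regex → Spec_make_epsilon_transition regex (make_epsilon_transition regex)

-- ===== LEMMAS AND PROOFS =====

-- pass 1 at index i only writes table key i
lemma pvStep1_getD_ne (r : List Char) (st : List Nat × PySem.Dict Nat (Nat × Option Nat))
    (j i : Nat) (h : j ≠ i) (d0 : Nat × Option Nat) :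
    ((pvStep1 r st i).2).getD j d0 = st.2.getD j d0 := by
  unfold pvStep1
  dsimp only
  split_ifs <;> try rfl
  all_goals obtain ⟨stk, dd⟩ := st
  all_goals rcases stk with _ | ⟨top, rest⟩
  all_goals try rcases rest with _ | ⟨gb, rest2⟩
  all_goals simp [PySem.Dict.getD_insert_of_ne, h, apply_ite (fun t : PySem.Dict Nat (Nat × Option Nat) => t.getD j d0), apply_ite Prod.snd]

-- a pass-1 fold over indices other than j leaves table key j unchanged
lemma foldl_pvStep1_getD (r : List Char) (is : List Nat)
    (st : List Nat × PySem.Dict Nat (Nat × Option Nat)) (j : Nat)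
    (h : ∀ i ∈ is, j ≠ i) (d0 : Nat × Option Nat) :
    ((is.foldl (pvStep1 r) st).2).getD j d0 = st.2.getD j d0 := by
  induction is generalizing st with
  | nil => rfl
  | cons a as ih =>
    simp only [List.foldl_cons]
    rw [ih _ (fun i hi => h i (List.mem_cons_of_mem _ hi)),
      pvStep1_getD_ne r st j a (h a List.mem_cons_self) d0]

-- the two lookahead tails agree on matching states
lemma pvLookA_eq (r : List Char) (i : Nat) (t : List (PySem.Set Int)) (s : List Nat) (g : Nat) :
    pvLookA r i (t, s, g) = (pvLookB r i (t, g), s) := by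
  unfold pvLookA pvLookB; dsimp only; split_ifs <;> rfl

-- pointwise correspondence: A's step = B's pass-2 step (given the table entry pass 1
-- produces at i) paired with B's pass-1 stack
lemma pvStepA_eq (r : List Char) (D : PySem.Dict Nat (Nat × Option Nat))
    (trans : List (PySem.Set Int)) (stack : List Nat)
    (d : PySem.Dict Nat (Nat × Option Nat)) (i : Nat)
    (hD : D.getD i (i, none) = ((pvStep1 r (stack, d) i).2).getD i (i, none)) :
    pvStepA r (trans, stack) i = (pvStep2 r D trans i, (pvStep1 r (stack, d) i).1) := by
  unfold pvStep1 at hD ⊢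
  unfold pvStepA pvStep2
  dsimp only at hD ⊢
  simp only [List.getD] at hD ⊢
  by_cases h1 : r[i]?.getD ' ' = '('
  · simp [h1, pvLookA_eq]
  by_cases h2 : r[i]?.getD ' ' = '|'
  · simp [h2, pvLookA_eq]
  by_cases h4 : r[i]?.getD ' ' = '*'
  · simp [h4, pvLookA_eq]
  by_cases h3 : r[i]?.getD ' ' = ')'
  case neg => simp [h1, h2, h3, h4, pvLookA_eq]
  rcases hstack : stack with _ | ⟨top, rest⟩ <;> simp only [hstack] at hD ⊢
  · simp only [h3] at hD ⊢
    simp [PySem.Dict.getD_insert_self] at hD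
    simp [hD, pvLookA_eq]
  by_cases ht1 : r[top]?.getD ' ' = '('
  · simp only [h3, ht1] at hD ⊢
    simp [PySem.Dict.getD_insert_self] at hD
    simp [hD, pvLookA_eq]
  by_cases ht2 : r[top]?.getD ' ' = '|'
  · rcases rest with _ | ⟨gb, rest2⟩ <;>
      · simp only [h3, ht2] at hD ⊢
        simp [PySem.Dict.getD_insert_self] at hD
        simp [hD, pvLookA_eq]
  · simp only [h3, ht1, ht2] at hD ⊢
    simp [PySem.Dict.getD_insert_self] at hD
    simp [hD, pvLookA_eq]

-- the two-pass pipeline tracks A's single pass, prefix by prefix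
lemma pv_main (r : List Char) (n : Nat) (hn : n ≤ r.length) :
    (List.range n).foldl (pvStepA r)
        (List.replicate r.length (PySem.Set.empty : PySem.Set Int), []) =
      ((List.range n).foldl
          (pvStep2 r (((List.range r.length).foldl (pvStep1 r) ([], PySem.Dict.empty)).2))
          (List.replicate r.length (PySem.Set.empty : PySem.Set Int)),
        ((List.range n).foldl (pvStep1 r) ([], PySem.Dict.empty)).1) := by
  induction n with
  | zero => rfl
  | succ k ih =>
    have hk : k ≤ r.length := Nat.le_of_succ_le hn
    have hrest : (((List.range r.length).foldl (pvStep1 r) ([], PySem.Dict.empty)).2).getD k (k, none)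
        = (((List.range (k + 1)).foldl (pvStep1 r) ([], PySem.Dict.empty)).2).getD k (k, none) := by
      have hsplit : r.length = (k + 1) + (r.length - (k + 1)) := by omega
      rw [hsplit, List.range_add, List.foldl_append]
      exact foldl_pvStep1_getD r _ _ k
        (by intro i hi; simp only [List.mem_map, List.mem_range] at hi; omega) _
    rw [List.range_succ, List.foldl_append, List.foldl_append, List.foldl_append, ih hk]
    simp only [List.foldl_cons, List.foldl_nil]
    exact pvStepA_eq r _ _ _ (((List.range k).foldl (pvStep1 r) ([], PySem.Dict.empty)).2) k
      (by rw [hrest, List.range_succ, List.foldl_append]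
          simp only [List.foldl_cons, List.foldl_nil])

-- ===== VERDICT (by name: the statement is the Claim_ definition above) =====
theorem make_epsilon_transition_spec : Claim_equal_make_epsilon_transition := by
  intro regex _ _
  unfold Spec_make_epsilon_transition make_epsilon_transition make_epsilon_transition_alt
  have h := pv_main regex.toList regex.toList.length le_rfl
  simp only [h]
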